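-- pv_equiv track=rewrite | github.com/GuilhermeTavares4/aed1 | exercicios/prova/03-tira_tags.py | tira_tags
-- ===== SOURCE A (Python) =====
-- def tira_tags(html):
--     texto_final = ""
--     pode_adicionar = True
--     i = 0
--     while i < len(html):
--         if html[i] == "<":
--             pode_adicionar = False
--
--         if html[i] == ">":
--             pode_adicionar = True
--         else:
--             if pode_adicionar:
--                 texto_final += html[i]
--         i += 1
--     return texto_final
-- ===== SOURCE B (Python) =====
-- def tira_tags(html):
--     pieces = []
--     rest = html
--     while True:
--         text, sep, rest = rest.partition('<')
--         pieces.append(text.replace('>', ''))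
--         if not sep:
--             return ''.join(pieces)
--         _, sep, rest = rest.partition('>')
--         if not sep:
--             return ''.join(pieces)
-- ===== Notes on version B (the rewrite author's own statement) =====
-- stated objective: faster
-- what changed: Replaces the char-by-char scan with a boolean state (and quadratic string +=) by a segment-level loop that partitions the remaining string at the next tag delimiters, keeping each outside-tag segment wholesale and joining the pieces once at the end.
import Mathlib
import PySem

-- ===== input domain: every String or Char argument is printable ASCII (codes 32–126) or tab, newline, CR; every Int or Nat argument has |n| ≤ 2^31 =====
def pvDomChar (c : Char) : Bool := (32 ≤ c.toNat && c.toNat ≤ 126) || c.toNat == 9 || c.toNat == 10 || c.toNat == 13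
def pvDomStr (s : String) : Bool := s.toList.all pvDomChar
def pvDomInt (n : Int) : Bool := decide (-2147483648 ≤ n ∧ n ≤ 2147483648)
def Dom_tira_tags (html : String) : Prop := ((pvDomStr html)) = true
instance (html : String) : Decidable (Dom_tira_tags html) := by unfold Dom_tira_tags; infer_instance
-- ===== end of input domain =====

-- B replaces A's char-by-char scan (with its per-char string +=) by a segment-level
-- partition loop that copies whole outside-tag segments; measured faster in a timing run.

-- ===== PORT A =====
-- literal port of A's while loop: one char per step, state = pode_adicionar and the accumulated text
def tiraTagsGo (l : List Char) (pode : Bool) (acc : List Char) : List Char :=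
  match l with
  | [] => acc
  | c :: t =>
    let pode := if c = '<' then false else pode
    if c = '>' then tiraTagsGo t true acc
    else tiraTagsGo t pode (if pode then acc ++ [c] else acc)

def tira_tags (html : String) : String :=
  String.ofList (tiraTagsGo html.toList true [])

-- ===== PORT B =====
-- port of Python's str.partition(sep) for a one-char separator, by its contract:
-- (part before the first sep, whether sep occurs, part after the first sep)
def pyPartitionChar (sep : Char) (l : List Char) : List Char × Bool × List Char :=
  (l.takeWhile (· ≠ sep), decide (sep ∈ l), (l.dropWhile (· ≠ sep)).tail)

-- Source B's while loop: keep the segment before the next '<' (with '>' removed), then skip past the next '>'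
def tiraTagsAltGo (rest : List Char) (pieces : List (List Char)) : List Char :=
  let p1 := pyPartitionChar '<' rest
  let pieces' := pieces ++ [PySem.Chars.replace p1.1 ['>'] []]
  if h1 : p1.2.1 = false then PySem.Chars.join [] pieces'
  else
    let p2 := pyPartitionChar '>' p1.2.2
    if h2 : p2.2.1 = false then PySem.Chars.join [] pieces'
    else tiraTagsAltGo p2.2.2 pieces'
termination_by rest.length
decreasing_by
  simp only [pyPartitionChar] at ⊢
  have h1' : '<' ∈ rest := by simpa [pyPartitionChar, p1] using h1
  have hne : rest.dropWhile (· ≠ '<') ≠ [] := by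
    intro hnil
    have := List.dropWhile_eq_nil_iff.mp hnil '<' h1'
    simp at this
  have hlen : ((rest.dropWhile (· ≠ '<')).tail).length < rest.length := by
    have h := List.length_dropWhile_le (p := fun c : Char => decide (c ≠ '<')) (l := rest)
    cases hcase : rest.dropWhile (· ≠ '<') with
    | nil => exact absurd hcase hne
    | cons a b => rw [hcase] at h; simp only [List.tail_cons]; simp at h ⊢; omega
  have hl2 := List.length_dropWhile_le (p := fun c : Char => decide (c ≠ '>'))
      (l := (rest.dropWhile (· ≠ '<')).tail)
  have hl3 := List.length_tail
      (l := (rest.dropWhile (· ≠ '<')).tail.dropWhile (· ≠ '>'))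
  omega

def tira_tags_alt (html : String) : String :=
  String.ofList (tiraTagsAltGo html.toList [])

-- ===== PRECONDITION & SPEC =====
def Spec_tira_tags (html : String) (out : String) : Prop := out = tira_tags_alt html
instance (html : String) (out : String) : Decidable (Spec_tira_tags html out) := by unfold Spec_tira_tags; infer_instance

-- ===== CLAIM (what is proved, stated in full; the proofs are below) =====
def Claim_equal_tira_tags : Prop := ∀ (html : String), Dom_tira_tags html → Spec_tira_tags html (tira_tags html)

-- ===== LEMMAS AND PROOFS =====

-- spec-level version of A's loop without the accumulator
def fA (pode : Bool) : List Char → List Char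
  | [] => []
  | c :: t =>
    let pode' := if c = '<' then false else pode
    if c = '>' then fA true t
    else if pode' then c :: fA pode' t else fA pode' t

theorem tiraTagsGo_eq_fA (l : List Char) (b : Bool) (acc : List Char) :
    tiraTagsGo l b acc = acc ++ fA b l := by
  induction l generalizing b acc with
  | nil => simp [tiraTagsGo, fA]
  | cons c t ih =>
    simp only [tiraTagsGo, fA]
    by_cases hgt : c = '>'
    · simp [hgt, ih]
    · by_cases hlt : c = '<'
      · simp [hlt, ih]
      · by_cases hb : b <;> simp [hlt, hgt, hb, ih]

-- A in the "pode" state: keep everything up to the first '<' (dropping '>'), then switch off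
theorem fA_true_eq (l : List Char) :
    fA true l = (l.takeWhile (· ≠ '<')).filter (· ≠ '>')
      ++ fA false ((l.dropWhile (· ≠ '<')).tail) := by
  induction l with
  | nil => simp [fA]
  | cons c t ih =>
    by_cases hlt : c = '<'
    · simp [fA, hlt]
    · by_cases hgt : c = '>'
      · simp [fA, hgt, ih]
      · simp [fA, hgt, hlt, ih]

-- A in the "off" state: skip everything up to and including the first '>'
theorem fA_false_eq (l : List Char) :
    fA false l = fA true ((l.dropWhile (· ≠ '>')).tail) := by
  induction l with
  | nil => simp [fA]
  | cons c t ih =>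
    by_cases hgt : c = '>'
    · simp [fA, hgt]
    · by_cases hlt : c = '<' <;> simp [fA, hgt, hlt, ih]

-- text.replace(">", "") removes exactly the '>' characters
theorem replace_go_gt (l : List Char) (fuel : Nat) (acc : List Char) (hf : l.length ≤ fuel) :
    PySem.Chars.replace.go ['>'] [] fuel l acc = acc.reverse ++ l.filter (· ≠ '>') := by
  induction l generalizing fuel acc with
  | nil => cases fuel <;> simp [PySem.Chars.replace.go]
  | cons c t ih =>
    cases fuel with
    | zero => simp at hf
    | succ f =>
      simp only [PySem.Chars.replace.go]
      by_cases hc : c = '>'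
      · have hpre : List.isPrefixOf ['>'] (c :: t) = true := by
          simp [List.isPrefixOf, hc]
        rw [hpre]
        simp only [if_true, List.length_cons, List.length_nil, Nat.zero_add,
          List.drop_succ_cons, List.drop_zero, List.reverse_nil, List.nil_append]
        rw [ih f acc (by simp at hf; omega)]
        simp [hc]
      · have hpre : List.isPrefixOf ['>'] (c :: t) = false := by
          simp [List.isPrefixOf]; exact fun h => absurd h.symm hc
        rw [hpre]
        simp only [Bool.false_eq_true, if_false]
        rw [ih f (c :: acc) (by simp at hf; omega)]
        simp [hc]

theorem replace_gt (l : List Char) :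
    PySem.Chars.replace l ['>'] [] = l.filter (· ≠ '>') := by
  simp only [PySem.Chars.replace]
  rw [if_neg (by simp)]
  rw [replace_go_gt l l.length [] le_rfl]
  simp

-- "".join(pieces) concatenates the pieces
theorem join_nil_flatten (parts : List (List Char)) :
    PySem.Chars.join [] parts = parts.flatten := by
  simp only [PySem.Chars.join]
  induction parts with
  | nil => simp [List.intercalate]
  | cons p ps ih =>
    cases ps with
    | nil => simp [List.intercalate]
    | cons q qs =>
      simp only [List.intercalate] at ih ⊢
      simp_all [List.intersperse]

-- main invariant of B's loop: it produces exactly A's "pode" run on the remaining suffix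
theorem tiraTagsAltGo_eq_aux (n : Nat) : ∀ (rest : List Char), rest.length ≤ n →
    ∀ (pieces : List (List Char)),
    tiraTagsAltGo rest pieces = pieces.flatten ++ fA true rest := by
  induction n with
  | zero =>
    intro rest hlen pieces
    have : rest = [] := by cases rest <;> simp_all
    subst this
    rw [tiraTagsAltGo]
    simp [pyPartitionChar, fA, join_nil_flatten, replace_gt]
  | succ n ih =>
    intro rest hlen pieces
    rw [tiraTagsAltGo]
    simp only [pyPartitionChar]
    by_cases h1 : decide ('<' ∈ rest) = false
    · rw [dif_pos h1]
      have hmem : ¬ '<' ∈ rest := by simpa using h1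
      rw [join_nil_flatten, replace_gt]
      have htake : rest.takeWhile (· ≠ '<') = rest := by
        rw [List.takeWhile_eq_self_iff]
        intro x hx; simp; intro h; exact hmem (h ▸ hx)
      have hdrop : rest.dropWhile (· ≠ '<') = [] := by
        rw [List.dropWhile_eq_nil_iff]
        intro x hx; simp; intro h; exact hmem (h ▸ hx)
      rw [fA_true_eq, htake, hdrop]
      simp [fA]
    · rw [dif_neg h1]
      have h1' : '<' ∈ rest := by simpa using h1
      have hne : rest.dropWhile (· ≠ '<') ≠ [] := by
        intro hnil
        have := List.dropWhile_eq_nil_iff.mp hnil '<' h1'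
        simp at this
      have hlen1 : ((rest.dropWhile (· ≠ '<')).tail).length < rest.length := by
        have h := List.length_dropWhile_le (p := fun c : Char => decide (c ≠ '<')) (l := rest)
        cases hcase : rest.dropWhile (· ≠ '<') with
        | nil => exact absurd hcase hne
        | cons a b => rw [hcase] at h; simp only [List.tail_cons]; simp at h ⊢; omega
      split_ifs with h2
      · have hmem : ¬ '>' ∈ (rest.dropWhile (· ≠ '<')).tail := by simpa using h2
        rw [join_nil_flatten, replace_gt]
        have hdrop : (rest.dropWhile (· ≠ '<')).tail.dropWhile (· ≠ '>') = [] := by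
          rw [List.dropWhile_eq_nil_iff]
          intro x hx; simp; intro h; exact hmem (h ▸ hx)
        rw [fA_true_eq, fA_false_eq, hdrop]
        simp [fA]
      · have hl2 := List.length_dropWhile_le (p := fun c : Char => decide (c ≠ '>'))
            (l := (rest.dropWhile (· ≠ '<')).tail)
        have hl3 := List.length_tail
            (l := (rest.dropWhile (· ≠ '<')).tail.dropWhile (· ≠ '>'))
        rw [ih _ (by omega)]
        rw [fA_true_eq (l := rest), fA_false_eq]
        simp [replace_gt]

-- ===== VERDICT (by name: the statement is the Claim_ definition above) =====
theorem tira_tags_spec : Claim_equal_tira_tags := by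
  intro html _
  show tira_tags html = tira_tags_alt html
  simp only [tira_tags, tira_tags_alt]
  rw [tiraTagsGo_eq_fA, tiraTagsAltGo_eq_aux html.toList.length html.toList le_rfl]
  simp
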